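-- pv_equiv track=rewrite | github.com/exsonic/FatSecret_Crawler | DataExtractor.py | mergeDietTrack
-- ===== SOURCE A (Python) =====
-- def mergeDietTrack(oldTrack, newTrack):
--     oldTrack, newTrack = sorted(oldTrack, key= lambda item : item[0]), sorted(newTrack, key= lambda item: item[0])
--     i = 0
--     for item in oldTrack:
--         if item[0] >= newTrack[0][0]:
--             break
--         i += 1
--     return oldTrack[0 : i] + newTrack
-- ===== SOURCE B (Python) =====
-- def mergeDietTrack(oldTrack, newTrack):
--     old = sorted(oldTrack, key=lambda item: item[0])
--     new = sorted(newTrack, key=lambda item: item[0])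
--     if not old:
--         return new
--     cutoff = new[0][0]
--     lo, hi = 0, len(old)
--     while lo < hi:
--         mid = (lo + hi) // 2
--         if old[mid][0] < cutoff:
--             lo = mid + 1
--         else:
--             hi = mid
--     return old[:lo] + new
-- ===== Notes on version B (the rewrite author's own statement) =====
-- stated objective: alternative
-- what changed: B replaces A's linear scan for the cutoff index with a hand-written binary search (bisect_left) over the sorted old track, guarded by an explicit empty-oldTrack early return.
import Mathlib
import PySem

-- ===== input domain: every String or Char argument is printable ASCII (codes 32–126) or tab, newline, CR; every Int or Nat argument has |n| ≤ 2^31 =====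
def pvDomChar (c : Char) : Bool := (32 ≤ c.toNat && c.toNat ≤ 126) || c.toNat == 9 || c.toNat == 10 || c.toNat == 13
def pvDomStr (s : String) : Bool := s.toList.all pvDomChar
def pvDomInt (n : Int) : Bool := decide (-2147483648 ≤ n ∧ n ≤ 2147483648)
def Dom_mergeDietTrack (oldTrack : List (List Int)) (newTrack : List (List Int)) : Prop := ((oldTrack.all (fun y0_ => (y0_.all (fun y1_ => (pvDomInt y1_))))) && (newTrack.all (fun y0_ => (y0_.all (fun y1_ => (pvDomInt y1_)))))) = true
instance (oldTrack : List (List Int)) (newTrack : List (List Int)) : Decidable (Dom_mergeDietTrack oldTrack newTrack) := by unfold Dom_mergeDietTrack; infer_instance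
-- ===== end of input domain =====

-- B replaces A's linear scan for the cutoff index with a binary search (bisect_left); same sorts, same result.

-- ===== PORT A =====
-- the for-loop with break: counts items of the sorted old track until one has item[0] >= cutoff
-- (item[0] is rendered as headI; exact on Pre_, where every inner list is nonempty)
def mergeDietTrackLoop (cut : Int) : List (List Int) → Nat
  | [] => 0
  | item :: rest => if item.headI ≥ cut then 0 else mergeDietTrackLoop cut rest + 1

def mergeDietTrack (oldTrack : List (List Int)) (newTrack : List (List Int)) : List (List Int) :=
  let old := PySem.List.sorted oldTrack (fun item => item.headI) false
  let new := PySem.List.sorted newTrack (fun item => item.headI) false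
  let i := mergeDietTrackLoop (new.headI.headI) old
  old.take i ++ new

-- ===== PORT B =====
-- hand-written bisect_left: while lo < hi: mid = (lo+hi)//2; …
def mergeDietTrackBisect (old : List (List Int)) (cut : Int) (lo hi : Nat) : Nat :=
  if h : lo < hi then
    let mid := (lo + hi) / 2
    if (old.getD mid []).headI < cut then mergeDietTrackBisect old cut (mid + 1) hi
    else mergeDietTrackBisect old cut lo mid
  else lo
termination_by hi - lo
decreasing_by all_goals omega

def mergeDietTrack_alt (oldTrack : List (List Int)) (newTrack : List (List Int)) : List (List Int) :=
  let old := PySem.List.sorted oldTrack (fun item => item.headI) false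
  let new := PySem.List.sorted newTrack (fun item => item.headI) false
  if old.isEmpty then new
  else
    let cutoff := new.headI.headI
    let lo := mergeDietTrackBisect old cutoff 0 old.length
    old.take lo ++ new

-- ===== PRECONDITION & SPEC =====
-- Pre_ excludes exactly the inputs where A raises IndexError: an empty inner list in either track
-- (the sort key item[0] fails), or a nonempty oldTrack with an empty newTrack (newTrack[0] fails).
def Pre_mergeDietTrack (oldTrack : List (List Int)) (newTrack : List (List Int)) : Prop :=
  (∀ item ∈ oldTrack, item ≠ []) ∧ (∀ item ∈ newTrack, item ≠ []) ∧ (oldTrack = [] ∨ newTrack ≠ [])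
instance (oldTrack : List (List Int)) (newTrack : List (List Int)) : Decidable (Pre_mergeDietTrack oldTrack newTrack) := by unfold Pre_mergeDietTrack; infer_instance

def pvWitness_mergeDietTrack : List (List Int) × List (List Int) := ([[3, 10], [1, 20], [5, 30]], [[4, 40], [2, 50]])

def Spec_mergeDietTrack (oldTrack : List (List Int)) (newTrack : List (List Int)) (out : List (List Int)) : Prop := out = mergeDietTrack_alt oldTrack newTrack
instance (oldTrack : List (List Int)) (newTrack : List (List Int)) (out : List (List Int)) : Decidable (Spec_mergeDietTrack oldTrack newTrack out) := by unfold Spec_mergeDietTrack; infer_instance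

-- ===== CLAIM (what is proved, stated in full; the proofs are below) =====
def Claim_equal_mergeDietTrack : Prop := ∀ (oldTrack : List (List Int)) (newTrack : List (List Int)), Dom_mergeDietTrack oldTrack newTrack → Pre_mergeDietTrack oldTrack newTrack → Spec_mergeDietTrack oldTrack newTrack (mergeDietTrack oldTrack newTrack)

-- ===== LEMMAS AND PROOFS =====

-- A's loop counts the takeWhile prefix of keys < cut
theorem mergeDietTrackLoop_eq_takeWhile (cut : Int) (l : List (List Int)) :
    mergeDietTrackLoop cut l = (l.takeWhile (fun item => decide (item.headI < cut))).length := by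
  induction l with
  | nil => rfl
  | cons a t ih =>
    by_cases h : a.headI ≥ cut
    · simp [mergeDietTrackLoop, List.takeWhile, h, not_lt.mpr h]
    · simp [mergeDietTrackLoop, List.takeWhile, h, lt_of_not_ge h, ih]

-- binary search converges to n when everything below n is < cut and everything from n on is ≥ cut
theorem mergeDietTrackBisect_eq (old : List (List Int)) (cut : Int) (n : Nat)
    (hlow : ∀ j, j < n → (old.getD j []).headI < cut)
    (hhigh : ∀ j, n ≤ j → j < old.length → ¬ (old.getD j []).headI < cut) :
    ∀ lo hi, lo ≤ n → n ≤ hi → hi ≤ old.length → mergeDietTrackBisect old cut lo hi = n := by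
  intro lo hi
  induction lo, hi using mergeDietTrackBisect.induct old cut with
  | case1 lo hi h mid hc ih =>
    intro h1 h2 h3
    rw [mergeDietTrackBisect, dif_pos h, if_pos hc]
    have : mid < n := by
      by_contra hcon
      exact hhigh mid (by omega) (by omega) hc
    exact ih (by omega) h2 h3
  | case2 lo hi h mid hc ih =>
    intro h1 h2 h3
    rw [mergeDietTrackBisect, dif_pos h, if_neg hc]
    have hmlt : mid < hi := by omega
    have : n ≤ mid := by
      by_contra hcon
      exact hc (hlow mid (by omega))
    exact ih h1 this (by omega)
  | case3 lo hi h =>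
    intro h1 h2 h3
    rw [mergeDietTrackBisect, dif_neg h]
    omega

-- the element just past the takeWhile prefix (if any) fails the predicate
theorem not_pred_at_takeWhile_length {α : Type} (p : α → Bool) :
    ∀ (l : List α) (h : (l.takeWhile p).length < l.length),
      ¬ p (l[(l.takeWhile p).length]'h) = true
  | a :: t, h => by
    by_cases hp : p a
    · simpa [List.takeWhile, hp] using not_pred_at_takeWhile_length p t (by simpa [List.takeWhile, hp] using h)
    · simp [List.takeWhile, hp]

-- ===== VERDICT (by name: the statement is the Claim_ definition above) =====
theorem mergeDietTrack_spec : Claim_equal_mergeDietTrack := by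
  intro oldTrack newTrack _ hpre
  unfold Spec_mergeDietTrack mergeDietTrack mergeDietTrack_alt
  by_cases hoe : (PySem.List.sorted oldTrack (fun item => item.headI) false).isEmpty
  · rw [List.isEmpty_iff] at hoe
    simp [hoe, mergeDietTrackLoop]
  · simp only [hoe, Bool.false_eq_true, if_false]
    set old := PySem.List.sorted oldTrack (fun item => item.headI) false with hold
    set cut := (PySem.List.sorted newTrack (fun item => item.headI) false).headI.headI
    set p : List Int → Bool := fun item => decide (item.headI < cut) with hp
    set n := (old.takeWhile p).length with hn
    have hnle : n ≤ old.length := (List.takeWhile_prefix p).length_le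
    have hlow : ∀ j, j < n → (old.getD j []).headI < cut := by
      intro j hj
      have hjl : j < old.length := lt_of_lt_of_le hj hnle
      have hpref : (old.takeWhile p) <+: old := List.takeWhile_prefix p
      have hget : (old.takeWhile p)[j]'(by omega) = old[j]'hjl := hpref.getElem _
      have hmem : (old.takeWhile p)[j]'(by omega) ∈ old.takeWhile p := List.getElem_mem _
      have := List.mem_takeWhile_imp hmem
      rw [hget] at this
      simpa [List.getD, List.getElem?_eq_getElem hjl, hp] using this
    have hhigh : ∀ j, n ≤ j → j < old.length → ¬ (old.getD j []).headI < cut := by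
      intro j hnj hjl
      have hnlt : n < old.length := lt_of_le_of_lt hnj hjl
      have hfail : ¬ p (old[n]'hnlt) = true := not_pred_at_takeWhile_length p old hnlt
      have hmono : (old[n]'hnlt).headI ≤ (old[j]'hjl).headI :=
        PySem.List.key_sorted_getElem_mono (xs := oldTrack) (key := fun item => item.headI) hnj hjl
      simp only [hp, decide_eq_true_eq] at hfail
      simp only [List.getD, List.getElem?_eq_getElem hjl, Option.getD_some]
      omega
    rw [mergeDietTrackBisect_eq old cut n hlow hhigh 0 old.length (Nat.zero_le _) hnle (le_refl _),
        mergeDietTrackLoop_eq_takeWhile]
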